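-- pv_equiv track=rewrite | github.com/vertica/vertica-python | vertica_python/vertica/cursor.py | format_quote
-- ===== SOURCE A (Python) =====
-- def format_quote(param: str, is_copy_data: bool, is_collection: bool) -> str:
--     if is_collection: # COPY COLLECTIONENCLOSE
--         s = list(param)
--         for i, c in enumerate(param):
--             if c in '\\\n\"':
--                 s[i] = "\\" + c
--         return u'"{0}"'.format(u"".join(s))
--     elif is_copy_data: # COPY ENCLOSED BY
--         s = list(param)
--         for i, c in enumerate(param):
--             if c in '\\|\n\'':
--                 s[i] = "\\" + c
--         return u"'{0}'".format(u"".join(s))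
--     else:
--         return u"'{0}'".format(param.replace(u"'", u"''"))
-- ===== SOURCE B (Python) =====
-- def format_quote(param: str, is_copy_data: bool, is_collection: bool) -> str:
--     if is_collection:  # COPY COLLECTIONENCLOSE
--         return '"' + param.replace('\\', '\\\\').replace('\n', '\\\n').replace('"', '\\"') + '"'
--     elif is_copy_data:  # COPY ENCLOSED BY
--         return "'" + param.replace('\\', '\\\\').replace('|', '\\|').replace('\n', '\\\n').replace("'", "\\'") + "'"
--     else:
--         return "'" + param.replace("'", "''") + "'"
-- ===== Notes on version B (the rewrite author's own statement) =====
-- stated objective: simpler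
-- what changed: The index-loop with enumerate and a membership test that rewrites a char list in place is replaced by a chain of whole-string str.replace passes (backslash escaped first), mirroring the existing else branch.
import Mathlib
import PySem

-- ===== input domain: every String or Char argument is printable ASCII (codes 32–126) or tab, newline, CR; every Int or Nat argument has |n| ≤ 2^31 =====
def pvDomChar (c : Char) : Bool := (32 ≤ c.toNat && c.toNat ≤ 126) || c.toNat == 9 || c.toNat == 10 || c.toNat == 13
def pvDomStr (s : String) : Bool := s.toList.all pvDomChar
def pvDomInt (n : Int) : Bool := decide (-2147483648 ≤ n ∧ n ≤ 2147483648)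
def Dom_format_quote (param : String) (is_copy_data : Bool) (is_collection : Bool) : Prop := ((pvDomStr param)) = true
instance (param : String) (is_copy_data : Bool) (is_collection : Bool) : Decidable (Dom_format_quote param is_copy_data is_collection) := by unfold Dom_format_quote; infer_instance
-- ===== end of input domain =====

-- B replaces A's enumerate-index loop with a chain of whole-string replace passes (backslash first); objective: simpler. Equivalence proved on all inputs.

-- ===== PORT A =====
-- A's loop: s = list(param) (each element a 1-char string), s[i] = "\" + c for special c, "".join(s).
-- Ported at the code-point level: each Python 1-2 char string is a List Char, "".join is flatten (exact).
def formatQuoteLoopA (specials : List Char) (param : List Char) : List Char :=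
  ((PySem.List.enumerate param).foldl
    (fun s ic => if ic.2 ∈ specials then s.set ic.1.toNat ['\\', ic.2] else s)
    (param.map (fun c => [c]))).flatten

def format_quote (param : String) (is_copy_data : Bool) (is_collection : Bool) : String :=
  if is_collection then
    String.ofList ('"' :: formatQuoteLoopA ['\\', '\n', '"'] param.toList ++ ['"'])
  else if is_copy_data then
    String.ofList ('\'' :: formatQuoteLoopA ['\\', '|', '\n', '\''] param.toList ++ ['\''])
  else
    String.ofList ('\'' :: PySem.Chars.replace param.toList ['\''] ['\'', '\''] ++ ['\''])

-- ===== PORT B =====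
-- Source B: a chain of str.replace passes (backslash escaped first), ported via PySem.Chars.replace on code points.
def format_quote_alt (param : String) (is_copy_data : Bool) (is_collection : Bool) : String :=
  if is_collection then
    String.ofList ('"' ::
      PySem.Chars.replace
        (PySem.Chars.replace
          (PySem.Chars.replace param.toList ['\\'] ['\\', '\\'])
          ['\n'] ['\\', '\n'])
        ['"'] ['\\', '"'] ++ ['"'])
  else if is_copy_data then
    String.ofList ('\'' ::
      PySem.Chars.replace
        (PySem.Chars.replace
          (PySem.Chars.replace
            (PySem.Chars.replace param.toList ['\\'] ['\\', '\\'])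
            ['|'] ['\\', '|'])
          ['\n'] ['\\', '\n'])
        ['\''] ['\\', '\''] ++ ['\''])
  else
    String.ofList ('\'' :: PySem.Chars.replace param.toList ['\''] ['\'', '\''] ++ ['\''])

-- ===== PRECONDITION & SPEC =====
def Spec_format_quote (param : String) (is_copy_data : Bool) (is_collection : Bool) (out : String) : Prop := out = format_quote_alt param is_copy_data is_collection
instance (param : String) (is_copy_data : Bool) (is_collection : Bool) (out : String) : Decidable (Spec_format_quote param is_copy_data is_collection out) := by unfold Spec_format_quote; infer_instance

-- ===== CLAIM (what is proved, stated in full; the proofs are below) =====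
def Claim_equal_format_quote : Prop := ∀ (param : String) (is_copy_data : Bool) (is_collection : Bool), Dom_format_quote param is_copy_data is_collection → Spec_format_quote param is_copy_data is_collection (format_quote param is_copy_data is_collection)

-- ===== LEMMAS AND PROOFS =====

-- Single-character replace is a per-character flatMap.
theorem replace_go_single (p : Char) (new : List Char) :
    ∀ (l : List Char) (fuel : Nat) (acc : List Char), l.length ≤ fuel →
      PySem.Chars.replace.go [p] new fuel l acc
        = acc.reverse ++ l.flatMap (fun c => if c = p then new else [c]) := by
  intro l
  induction l with
  | nil =>
      intro fuel acc _
      cases fuel <;> simp [PySem.Chars.replace.go]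
  | cons c t ih =>
      intro fuel acc hle
      cases fuel with
      | zero => simp at hle
      | succ f =>
          rw [PySem.Chars.replace.go]
          simp only [List.isPrefixOf, Bool.and_true]
          by_cases hc : p = c
          · subst hc
            simp only [beq_self_eq_true, if_pos, List.length_cons, List.length_nil,
              List.drop_succ_cons, List.drop_zero]
            rw [ih _ (new.reverse ++ acc) (by simpa using Nat.le_of_succ_le_succ hle)]
            simp
          · have hbc : (p == c) = false := beq_eq_false_iff_ne.mpr hc
            simp only [hbc, if_neg Bool.false_ne_true]
            rw [ih _ (c :: acc) (Nat.le_of_succ_le_succ hle)]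
            have : ¬ c = p := fun h => hc h.symm
            simp [this]

theorem replace_single (l : List Char) (p : Char) (new : List Char) :
    PySem.Chars.replace l [p] new = l.flatMap (fun c => if c = p then new else [c]) := by
  rw [PySem.Chars.replace]
  simp only [List.isEmpty_cons, if_neg Bool.false_ne_true]
  simpa using replace_go_single p new l l.length [] le_rfl

-- A's enumerate/set loop rewrites exactly the characters in `sp`, position by position.
theorem loopA_invariant (sp : List Char) :
    ∀ (l : List Char) (k : Nat) (t : List (List Char)), t.length = k →
      ((PySem.List.enumerate l (k : Int)).foldl
          (fun s ic => if ic.2 ∈ sp then s.set ic.1.toNat ['\\', ic.2] else s)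
          (t ++ l.map (fun c => [c])))
        = t ++ l.map (fun c => if c ∈ sp then ['\\', c] else [c]) := by
  intro l
  induction l with
  | nil => intro k t _; simp [PySem.List.enumerate]
  | cons c r ih =>
      intro k t ht
      rw [PySem.List.enumerate_cons]
      simp only [List.foldl_cons]
      by_cases hc : c ∈ sp
      · have hset : (t ++ [c] :: r.map (fun c => [c])).set ((k : Int)).toNat ['\\', c]
            = (t ++ [['\\', c]]) ++ r.map (fun c => [c]) := by
          simp [ht]
        simp only [List.map_cons, hc, if_pos]
        rw [show (t ++ [c] :: List.map (fun c => [c]) r) = t ++ [c] :: r.map (fun c => [c]) from rfl,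
            hset]
        have : ((k : Int) + 1) = ((k + 1 : Nat) : Int) := by push_cast; ring
        rw [this, ih (k + 1) (t ++ [['\\', c]]) (by simp [ht])]
        simp
      · simp only [List.map_cons, hc, if_neg, not_false_iff]
        have : ((k : Int) + 1) = ((k + 1 : Nat) : Int) := by push_cast; ring
        rw [show t ++ [c] :: List.map (fun c => [c]) r = (t ++ [[c]]) ++ r.map (fun c => [c]) by simp]
        rw [this, ih (k + 1) (t ++ [[c]]) (by simp [ht])]
        simp

theorem loopA_eq_flatMap (sp : List Char) (l : List Char) :
    formatQuoteLoopA sp l = l.flatMap (fun c => if c ∈ sp then ['\\', c] else [c]) := by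
  have h := loopA_invariant sp l 0 [] rfl
  simp only [List.nil_append, Nat.cast_zero] at h
  unfold formatQuoteLoopA
  rw [h]
  simp [List.flatMap_def]

theorem chain_collection (l : List Char) :
    ((l.flatMap (fun c => if c = '\\' then ['\\', '\\'] else [c])).flatMap
        (fun c => if c = '\n' then ['\\', '\n'] else [c])).flatMap
      (fun c => if c = '"' then ['\\', '"'] else [c])
    = l.flatMap (fun c => if c ∈ ['\\', '\n', '"'] then ['\\', c] else [c]) := by
  rw [List.flatMap_assoc, List.flatMap_assoc]
  congr 1
  funext c
  by_cases h1 : c = '\\'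
  · subst h1; decide
  · by_cases h2 : c = '\n'
    · subst h2; decide
    · by_cases h3 : c = '"'
      · subst h3; decide
      · simp [h1, h2, h3]

theorem chain_copy (l : List Char) :
    (((l.flatMap (fun c => if c = '\\' then ['\\', '\\'] else [c])).flatMap
          (fun c => if c = '|' then ['\\', '|'] else [c])).flatMap
        (fun c => if c = '\n' then ['\\', '\n'] else [c])).flatMap
      (fun c => if c = '\'' then ['\\', '\''] else [c])
    = l.flatMap (fun c => if c ∈ ['\\', '|', '\n', '\''] then ['\\', c] else [c]) := by
  rw [List.flatMap_assoc, List.flatMap_assoc, List.flatMap_assoc]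
  congr 1
  funext c
  by_cases h1 : c = '\\'
  · subst h1; decide
  · by_cases h2 : c = '|'
    · subst h2; decide
    · by_cases h3 : c = '\n'
      · subst h3; decide
      · by_cases h4 : c = '\''
        · subst h4; decide
        · simp [h1, h2, h3, h4]

-- ===== VERDICT (by name: the statement is the Claim_ definition above) =====
theorem format_quote_spec : Claim_equal_format_quote := by
  intro param is_copy_data is_collection _
  unfold Spec_format_quote format_quote format_quote_alt
  cases is_collection with
  | true =>
      simp only [reduceIte]
      rw [loopA_eq_flatMap, replace_single, replace_single, replace_single, chain_collection]
  | false =>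
      cases is_copy_data with
      | true =>
          simp only [Bool.false_eq_true, reduceIte]
          rw [loopA_eq_flatMap, replace_single, replace_single, replace_single, replace_single,
              chain_copy]
      | false => simp
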